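-- pv_equiv track=rewrite | github.com/DaniellTa/twosidepll | pll_recog.py | check_pll
-- ===== SOURCE A (Python) =====
-- pll = {
--     "Aa": "brrggbrogobobrr",
--     "Ab": "orrggobobrbgorr",
--     "E": "grbrgobogobrgrb",
--     "F": "gggorbrboborggg",
--     "Ga": "ogobrrggobrbgogo",
--     "Gb": "gbgorbroobgrgbg",
--     "Gc": "rgrgbobrgoobrgr",
--     "Gd": "gbgogbrroborgbg",
--     "H": "orobgbrorgbgoro",
--     "Ja": "gggoobrrobbrggg",
--     "Jb": "gggobbroobrrggg",
--     "Na": "gbbroobggorrgbb",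
--     "Nb": "ggbrrobbgoorggb",
--     "Ra": "ogobbrgrbrogogo",
--     "Rb": "rgrgrobogobbrgr",
--     "T": "gbgoobrgobrrgbg",
--     "Ua": "bbbrgrgogorobbb",
--     "Ub": "bbbrorgrgogobbb",
--     "V": "roobbgogrgrbroo",
--     "Y": "rrobggobrgobrro",
--     "Z": "gogogobrbrbrgog"
-- }
--
-- def next_colour(colour: str) -> str:
--     next = {
--         "g": "o",
--         "o": "b",
--         "b": "r",
--         "r": "g"
--     }
--     return next[colour]
--
-- def rotate(text: str) -> str:
--     rotated = ""
--     for colour in text: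
--         rotated += next_colour(colour)
--     return rotated
--
-- def check_pll(text: str) -> str:
--     for key in pll:
--         for _ in range(4):
--             if text in pll[key]:
--                 return key + " perm"
--             else:
--                 text = rotate(text)
--     return "not pll"
-- ===== SOURCE B (Python) =====
-- pll = {
--     "Aa": "brrggbrogobobrr",
--     "Ab": "orrggobobrbgorr",
--     "E": "grbrgobogobrgrb",
--     "F": "gggorbrboborggg",
--     "Ga": "ogobrrggobrbgogo",
--     "Gb": "gbgorbroobgrgbg",
--     "Gc": "rgrgbobrgoobrgr",
--     "Gd": "gbgogbrroborgbg",
--     "H": "orobgbrorgbgoro",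
--     "Ja": "gggoobrrobbrggg",
--     "Jb": "gggobbroobrrggg",
--     "Na": "gbbroobggorrgbb",
--     "Nb": "ggbrrobbgoorggb",
--     "Ra": "ogobbrgrbrogogo",
--     "Rb": "rgrgrobogobbrgr",
--     "T": "gbgoobrgobrrgbg",
--     "Ua": "bbbrgrgogorobbb",
--     "Ub": "bbbrorgrgogobbb",
--     "V": "roobbgogrgrbroo",
--     "Y": "rrobggobrgobrro",
--     "Z": "gogogobrbrbrgog"
-- }
--
-- _VAL = {"g": 0, "o": 1, "b": 2, "r": 3}
--
--
-- def _diff(s: str) -> str: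
--     # rotation-invariant signature: successive colour differences mod 4
--     out = ""
--     for a, b in zip(s, s[1:]):
--         out += str((_VAL[b] - _VAL[a]) % 4)
--     return out
--
--
-- _PLL_DIFF = {key: _diff(p) for key, p in pll.items()}
--
--
-- def check_pll(text: str) -> str:
--     # Colour rotation adds 1 mod 4 to every sticker, so it leaves the difference
--     # signature unchanged: some rotation of `text` occurs in a pattern iff
--     # _diff(text) occurs in the pattern's signature (patterns are non-empty).
--     sig = _diff(text)
--     for key, dp in _PLL_DIFF.items():
--         if sig in dp:
--             return key + " perm"
--     return "not pll"
-- ===== Notes on version B (the rewrite author's own statement) =====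
-- stated objective: alternative
-- what changed: B never rotates the text: it replaces rotation-matching by a rotation-invariant difference signature (successive colour differences mod 4), precomputed once for the 21 patterns, and does one substring test per pattern (correct because a colour rotation adds 1 mod 4 to every sticker, leaving the signature unchanged, and the patterns are non-empty).
import Mathlib
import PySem

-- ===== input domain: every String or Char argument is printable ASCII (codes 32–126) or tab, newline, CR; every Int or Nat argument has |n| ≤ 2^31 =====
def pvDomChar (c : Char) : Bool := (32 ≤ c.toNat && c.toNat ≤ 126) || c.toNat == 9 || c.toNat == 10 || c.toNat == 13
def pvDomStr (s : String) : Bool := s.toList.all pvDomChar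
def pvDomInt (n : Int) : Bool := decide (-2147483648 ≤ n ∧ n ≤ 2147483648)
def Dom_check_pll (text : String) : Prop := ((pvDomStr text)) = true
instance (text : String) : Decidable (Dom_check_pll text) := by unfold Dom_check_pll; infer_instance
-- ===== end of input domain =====

-- B replaces rotation-matching by a rotation-invariant difference signature
-- (successive colour differences mod 4), precomputed once per pattern; objective: alternative.

-- shared module-level table (the Python module constant `pll`, insertion order)
def pllTable : List (String × String) :=
  [("Aa", "brrggbrogobobrr"), ("Ab", "orrggobobrbgorr"), ("E", "grbrgobogobrgrb"),
   ("F", "gggorbrboborggg"), ("Ga", "ogobrrggobrbgogo"), ("Gb", "gbgorbroobgrgbg"),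
   ("Gc", "rgrgbobrgoobrgr"), ("Gd", "gbgogbrroborgbg"), ("H", "orobgbrorgbgoro"),
   ("Ja", "gggoobrrobbrggg"), ("Jb", "gggobbroobrrggg"), ("Na", "gbbroobggorrgbb"),
   ("Nb", "ggbrrobbgoorggb"), ("Ra", "ogobbrgrbrogogo"), ("Rb", "rgrgrobogobbrgr"),
   ("T", "gbgoobrgobrrgbg"), ("Ua", "bbbrgrgogorobbb"), ("Ub", "bbbrorgrgogobbb"),
   ("V", "roobbgogrgrbroo"), ("Y", "rrobggobrgobrro"), ("Z", "gogogobrbrbrgog")]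

-- ===== PORT A =====
-- next_colour: dict lookup; none = Python KeyError
def next_colour (colour : Char) : Option Char :=
  PySem.Dict.get? (PySem.Dict.ofList [('g', 'o'), ('o', 'b'), ('b', 'r'), ('r', 'g')]) colour

-- rotate: rotated = ""; for colour in text: rotated += next_colour(colour)
def rotateGoA : List Char → List Char → Option (List Char)
  | [], acc => some acc
  | c :: rest, acc =>
    match next_colour c with
    | none => none
    | some d => rotateGoA rest (acc ++ [d])

def rotateA (text : String) : Option String :=
  (rotateGoA text.toList []).map String.ofList

-- inner `for _ in range(4)` loop of check_pll: Bool = "returned", second = current text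
def tryKeyA (pattern : String) (text : String) : Nat → Option (Bool × String)
  | 0 => some (false, text)
  | n + 1 =>
    if PySem.Str.isIn text pattern then some (true, text)
    else
      match rotateA text with
      | none => none
      | some t' => tryKeyA pattern t' n

-- outer `for key in pll` loop
def goA : List (String × String) → String → Option String
  | [], _ => some "not pll"
  | (key, pat) :: rest, text =>
    match tryKeyA pat text 4 with
    | none => none
    | some (true, _) => some (key ++ " perm")
    | some (false, t') => goA rest t'

def check_pll (text : String) : String :=
  (goA pllTable text).getD ""   -- "" only on the KeyError path, excluded by Pre_

-- ===== PORT B =====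
-- _VAL
def valDict : PySem.Dict Char Int :=
  PySem.Dict.ofList [('g', 0), ('o', 1), ('b', 2), ('r', 3)]

-- _diff: out = ""; for a, b in zip(s, s[1:]): out += str((_VAL[b] - _VAL[a]) % 4)
def diffGoB : List (Char × Char) → List Char → Option (List Char)
  | [], acc => some acc
  | (a, b) :: rest, acc =>
    match PySem.Dict.get? valDict a, PySem.Dict.get? valDict b with
    | some va, some vb =>
        diffGoB rest (acc ++ (PySem.Int.toStr (PySem.Int.mod (vb - va) 4)).toList)
    | _, _ => none   -- KeyError

def diffB (s : String) : Option String :=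
  (diffGoB (s.toList.zip (s.toList.drop 1)) []).map String.ofList

-- _PLL_DIFF = {key: _diff(p) for key, p in pll.items()} (always succeeds on the table)
def pllDiffTable : List (String × String) :=
  pllTable.map (fun kp => (kp.1, (diffB kp.2).getD ""))

-- the `for key, dp in _PLL_DIFF.items()` loop
def goB : List (String × String) → String → String
  | [], _ => "not pll"
  | (key, dp) :: rest, sig =>
    if PySem.Str.isIn sig dp then key ++ " perm" else goB rest sig

def check_pll_alt (text : String) : String :=
  match diffB text with
  | none => ""   -- KeyError path, excluded by Pre_
  | some sig => goB pllDiffTable sig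

-- ===== PRECONDITION & SPEC =====
-- Pre_ excludes exactly the inputs where A raises KeyError: any text containing a
-- character outside {g,o,b,r} (such a non-empty text is never a substring of the
-- all-gobr patterns, so A always reaches rotate and raises).
def Pre_check_pll (text : String) : Prop :=
  text.toList.all (fun c => c == 'g' || c == 'o' || c == 'b' || c == 'r') = true
instance (text : String) : Decidable (Pre_check_pll text) := by unfold Pre_check_pll; infer_instance

def pvWitness_check_pll : String := "gobr"

def Spec_check_pll (text : String) (out : String) : Prop := out = check_pll_alt text
instance (text : String) (out : String) : Decidable (Spec_check_pll text out) := by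
  unfold Spec_check_pll; infer_instance

-- ===== CLAIM (what is proved, stated in full; the proofs are below) =====
def Claim_equal_check_pll : Prop :=
  ∀ (text : String), Dom_check_pll text → Pre_check_pll text → Spec_check_pll text (check_pll text)

-- ===== LEMMAS AND PROOFS =====

-- proof-side total successor-colour function and colour alphabet
def nextC : Char → Char
  | 'g' => 'o'
  | 'o' => 'b'
  | 'b' => 'r'
  | 'r' => 'g'
  | c => c

abbrev gobr (c : Char) : Prop := c = 'g' ∨ c = 'o' ∨ c = 'b' ∨ c = 'r'

-- proof-side pure difference signature
def valN : Char → Nat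
  | 'o' => 1
  | 'b' => 2
  | 'r' => 3
  | _ => 0

def dchar : Nat → Char
  | 0 => '0'
  | 1 => '1'
  | 2 => '2'
  | _ => '3'

def pairChar (a b : Char) : Char := dchar ((valN b + 4 - valN a) % 4)

def diffP : List Char → List Char
  | a :: b :: t => pairChar a b :: diffP (b :: t)
  | _ => []

def shiftK (k : Nat) (c : Char) : Char := nextC^[k] c

def kOf (c h : Char) : Nat := (valN h + 4 - valN c) % 4

-- ----- small case lemmas on the colour alphabet -----
theorem gobr_nextC {c : Char} (h : gobr c) : gobr (nextC c) := by
  rcases h with rfl | rfl | rfl | rfl <;> simp [nextC, gobr]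

theorem next_colour_eq {c : Char} (h : gobr c) : next_colour c = some (nextC c) := by
  rcases h with rfl | rfl | rfl | rfl <;> decide

theorem nextC_four {c : Char} (h : gobr c) : nextC (nextC (nextC (nextC c))) = c := by
  rcases h with rfl | rfl | rfl | rfl <;> rfl

theorem pairChar_next {a b : Char} (ha : gobr a) (hb : gobr b) :
    pairChar (nextC a) (nextC b) = pairChar a b := by
  rcases ha with rfl | rfl | rfl | rfl <;> rcases hb with rfl | rfl | rfl | rfl <;> decide

theorem kOf_lt (c h : Char) : kOf c h < 4 := Nat.mod_lt _ (by norm_num)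

theorem shiftK_kOf {c h : Char} (hc : gobr c) (hh : gobr h) : shiftK (kOf c h) c = h := by
  rcases hc with rfl | rfl | rfl | rfl <;> rcases hh with rfl | rfl | rfl | rfl <;> decide

theorem kOf_shiftK {c : Char} (hc : gobr c) {k : Nat} (hk : k < 4) :
    kOf c (shiftK k c) = k := by
  interval_cases k <;> rcases hc with rfl | rfl | rfl | rfl <;> decide

theorem pair_inj {a a' b b' : Char} (ha : gobr a) (ha' : gobr a') (hb : gobr b) (hb' : gobr b')
    (h : pairChar a a' = pairChar b b') : b' = shiftK (kOf a b) a' := by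
  rcases ha with rfl | rfl | rfl | rfl <;> rcases ha' with rfl | rfl | rfl | rfl <;>
    rcases hb with rfl | rfl | rfl | rfl <;> rcases hb' with rfl | rfl | rfl | rfl <;>
      revert h <;> decide

-- ----- diffP structure lemmas -----
theorem diffP_rot {l : List Char} (h : ∀ c ∈ l, gobr c) :
    diffP (l.map nextC) = diffP l := by
  induction l with
  | nil => rfl
  | cons a t ih =>
    cases t with
    | nil => rfl
    | cons b t' =>
      have ha := h a (by simp)
      have hb := h b (by simp)
      have ih' := ih (fun c hc => h c (List.mem_cons_of_mem a hc))
      simpa [diffP, pairChar_next ha hb] using ih'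

theorem diffP_tail (l : List Char) : diffP l.tail = (diffP l).tail := by
  match l with
  | [] => rfl
  | [_] => rfl
  | _ :: _ :: _ => rfl

theorem diffP_drop (i : Nat) (l : List Char) : diffP (l.drop i) = (diffP l).drop i := by
  induction i with
  | zero => rfl
  | succ n ih =>
    rw [← List.tail_drop, ← List.tail_drop, diffP_tail, ih]

theorem diffP_take : ∀ (n : Nat) (l : List Char), diffP (l.take n) = (diffP l).take (n - 1) := by
  intro n l
  induction l generalizing n with
  | nil => simp [diffP]
  | cons a t ih =>
    cases t with
    | nil => cases n with
      | zero => rfl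
      | succ m => cases m <;> rfl
    | cons b t' =>
      cases n with
      | zero => rfl
      | succ m =>
        cases m with
        | zero => rfl
        | succ m' =>
          have h := ih (m' + 1)
          simp only [List.take_succ_cons, diffP, Nat.add_sub_cancel] at h ⊢
          rw [h]

theorem diffP_len (l : List Char) : (diffP l).length = l.length - 1 := by
  induction l with
  | nil => rfl
  | cons a t ih =>
    cases t with
    | nil => rfl
    | cons b t' => simp [diffP] at ih ⊢; omega

theorem diffP_infix {x p : List Char} (h : x <:+: p) : diffP x <:+: diffP p := by
  obtain ⟨u, v, hp⟩ := h
  subst hp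
  have h2 : diffP x = ((diffP (u ++ x ++ v)).drop u.length).take (x.length - 1) := by
    conv_lhs => rw [show x = ((u ++ x ++ v).drop u.length).take x.length by
      rw [List.append_assoc, List.drop_left, List.take_left]]
    rw [diffP_take, diffP_drop]
  rw [h2]
  exact (List.take_prefix ..).isInfix.trans (List.drop_suffix ..).isInfix

-- ----- the four rotations as mapped shifts -----
theorem mapShift0 (l : List Char) : l.map (shiftK 0) = l :=
  (List.map_congr_left (fun _ _ => rfl)).trans (List.map_id l)

theorem mapShift_succ (k : Nat) (l : List Char) :
    l.map (shiftK (k + 1)) = (l.map (shiftK k)).map nextC := by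
  rw [List.map_map]
  exact List.map_congr_left (fun c _ => Function.iterate_succ_apply' nextC k c)

theorem disj_of_shift {l p : List Char} {k : Nat} (hk : k < 4)
    (h : l.map (shiftK k) <:+: p) :
    (l <:+: p) ∨ (l.map nextC <:+: p) ∨ ((l.map nextC).map nextC <:+: p) ∨
      (((l.map nextC).map nextC).map nextC <:+: p) := by
  interval_cases k
  · rw [mapShift0] at h; exact Or.inl h
  · rw [mapShift_succ, mapShift0] at h; exact Or.inr (Or.inl h)
  · rw [mapShift_succ, mapShift_succ, mapShift0] at h; exact Or.inr (Or.inr (Or.inl h))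
  · rw [mapShift_succ, mapShift_succ, mapShift_succ, mapShift0] at h
    exact Or.inr (Or.inr (Or.inr h))

-- ----- equal signatures mean a constant colour shift -----
theorem diff_det : ∀ (x : List Char) (a b : Char) (y : List Char),
    (∀ c ∈ a :: x, gobr c) → (∀ c ∈ b :: y, gobr c) → x.length = y.length →
    diffP (a :: x) = diffP (b :: y) → b :: y = (a :: x).map (shiftK (kOf a b)) := by
  intro x
  induction x with
  | nil =>
    intro a b y hga hgy hlen _
    cases y with
    | nil =>
      simp [List.map_cons, shiftK_kOf (hga a (by simp)) (hgy b (by simp))]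
    | cons c cs => simp at hlen
  | cons a' x' ih =>
    intro a b y hga hgy hlen hd
    cases y with
    | nil => simp at hlen
    | cons b' y' =>
      have hga0 : gobr a := hga a (by simp)
      have hga' : gobr a' := hga a' (by simp)
      have hgb0 : gobr b := hgy b (by simp)
      have hgb' : gobr b' := hgy b' (by simp)
      simp only [diffP, List.cons.injEq] at hd
      obtain ⟨hpair, hrest⟩ := hd
      have hb' : b' = shiftK (kOf a b) a' := pair_inj hga0 hga' hgb0 hgb' hpair
      have hk : kOf a' b' = kOf a b := by
        rw [hb']; exact kOf_shiftK hga' (kOf_lt a b)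
      have hrec := ih a' b' y' (fun c hc => hga c (List.mem_cons_of_mem a hc))
        (fun c hc => hgy c (List.mem_cons_of_mem b hc)) (by simpa using hlen) hrest
      rw [hk] at hrec
      calc b :: b' :: y' = b :: (a' :: x').map (shiftK (kOf a b)) := by rw [← hrec]
        _ = (a :: a' :: x').map (shiftK (kOf a b)) := by
            simp [List.map_cons, shiftK_kOf hga0 hgb0]

-- ----- the central equivalence: rotation-matching = signature containment -----
theorem main_iff (l p : List Char) (hl : ∀ c ∈ l, gobr c) (hp : ∀ c ∈ p, gobr c)
    (hne : p ≠ []) :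
    ((l <:+: p) ∨ (l.map nextC <:+: p) ∨ ((l.map nextC).map nextC <:+: p) ∨
      (((l.map nextC).map nextC).map nextC <:+: p)) ↔ diffP l <:+: diffP p := by
  have hl1 : ∀ c ∈ l.map nextC, gobr c := by
    intro c hc; obtain ⟨d, hd, rfl⟩ := List.mem_map.mp hc; exact gobr_nextC (hl d hd)
  have hl2 : ∀ c ∈ (l.map nextC).map nextC, gobr c := by
    intro c hc; obtain ⟨d, hd, rfl⟩ := List.mem_map.mp hc; exact gobr_nextC (hl1 d hd)
  constructor
  · rintro (h | h | h | h)
    · exact diffP_infix h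
    · have := diffP_infix h; rwa [diffP_rot hl] at this
    · have := diffP_infix h; rwa [diffP_rot hl1, diffP_rot hl] at this
    · have := diffP_infix h; rwa [diffP_rot hl2, diffP_rot hl1, diffP_rot hl] at this
  · intro h
    cases l with
    | nil => exact Or.inl (List.nil_infix)
    | cons a l1 =>
      cases l1 with
      | nil =>
        cases p with
        | nil => exact absurd rfl hne
        | cons h0 p' =>
          have hsh : shiftK (kOf a h0) a = h0 :=
            shiftK_kOf (hl a (by simp)) (hp h0 (by simp))
          have hinf : [a].map (shiftK (kOf a h0)) <:+: h0 :: p' := by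
            rw [List.map_cons, List.map_nil, hsh]
            exact ⟨[], p', rfl⟩
          exact disj_of_shift (kOf_lt a h0) hinf
      | cons a1 l2 =>
        obtain ⟨u, v, hP⟩ := h
        have hpre : diffP (a :: a1 :: l2) <+: (diffP p).drop u.length := by
          rw [← hP, List.append_assoc, List.drop_left]; exact ⟨v, rfl⟩
        rw [← diffP_drop] at hpre
        have hdne : diffP (a :: a1 :: l2) ≠ [] := by simp [diffP]
        have hmne : p.drop u.length ≠ [] := by
          intro hnil
          rw [hnil] at hpre
          exact hdne (List.prefix_nil.mp hpre)
        have hlen1 := hpre.length_le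
        rw [diffP_len, diffP_len] at hlen1
        have hmpos : 0 < (p.drop u.length).length := List.length_pos_of_ne_nil hmne
        have hlen2 : (a :: a1 :: l2).length ≤ (p.drop u.length).length := by
          simp only [List.length_cons] at hlen1 ⊢; omega
        have heq : diffP (a :: a1 :: l2) =
            diffP ((p.drop u.length).take (a :: a1 :: l2).length) := by
          rw [diffP_take, ← diffP_len]
          exact List.prefix_iff_eq_take.mp hpre
        have hmtlen : ((p.drop u.length).take (a :: a1 :: l2).length).length =
            (a :: a1 :: l2).length := by
          rw [List.length_take]; omega
        obtain ⟨h0, m', hm'⟩ : ∃ h0 m',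
            (p.drop u.length).take (a :: a1 :: l2).length = h0 :: m' := by
          cases hcase : (p.drop u.length).take (a :: a1 :: l2).length with
          | nil => rw [hcase] at hmtlen; simp at hmtlen
          | cons c r => exact ⟨c, r, rfl⟩
        have hgm : ∀ c ∈ h0 :: m', gobr c := by
          intro c hc
          rw [← hm'] at hc
          exact hp c (List.mem_of_mem_drop (List.mem_of_mem_take hc))
        have hylen : (a1 :: l2).length = m'.length := by
          rw [hm'] at hmtlen
          simp only [List.length_cons] at hmtlen ⊢; omega
        have hdet := diff_det (a1 :: l2) a h0 m' hl hgm hylen (by rw [heq, hm'])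
        have hinf : (a :: a1 :: l2).map (shiftK (kOf a h0)) <:+: p := by
          rw [← hdet, ← hm']
          exact (List.take_prefix ..).isInfix.trans (List.drop_suffix ..).isInfix
        exact disj_of_shift (kOf_lt a h0) hinf

-- ----- A-side string-level loop characterisation -----
def rotS (t : String) : String := String.ofList (t.toList.map nextC)

theorem toList_rotS (t : String) : (rotS t).toList = t.toList.map nextC := by
  simp [rotS]

def PreS (t : String) : Prop := ∀ c ∈ t.toList, gobr c

theorem PreS_rotS {t : String} (h : PreS t) : PreS (rotS t) := by
  intro c hc
  rw [toList_rotS] at hc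
  obtain ⟨d, hd, rfl⟩ := List.mem_map.mp hc
  exact gobr_nextC (h d hd)

theorem rotateGoA_eq (l : List Char) (h : ∀ c ∈ l, gobr c) :
    ∀ acc, rotateGoA l acc = some (acc ++ l.map nextC) := by
  induction l with
  | nil => intro acc; simp [rotateGoA]
  | cons c rest ih =>
    intro acc
    have hc := h c (by simp)
    simp [rotateGoA, next_colour_eq hc,
      ih (fun x hx => h x (List.mem_cons_of_mem c hx))]

theorem rotateA_eq {t : String} (h : PreS t) : rotateA t = some (rotS t) := by
  simp [rotateA, rotateGoA_eq t.toList h, rotS]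

theorem rotS_four {t : String} (h : PreS t) : rotS (rotS (rotS (rotS t))) = t := by
  have h4 : (rotS (rotS (rotS (rotS t)))).toList = t.toList := by
    simp only [toList_rotS, List.map_map]
    calc t.toList.map (nextC ∘ nextC ∘ nextC ∘ nextC)
        = t.toList.map id := List.map_congr_left (fun c hc => nextC_four (h c hc))
      _ = t.toList := List.map_id _
  calc rotS (rotS (rotS (rotS t)))
      = String.ofList ((rotS (rotS (rotS (rotS t)))).toList) := by simp
    _ = String.ofList t.toList := by rw [h4]
    _ = t := by simp

theorem goA_cons (key pat : String) (rest : List (String × String)) {t : String} (h : PreS t) :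
    goA ((key, pat) :: rest) t =
      if PySem.Str.isIn t pat || PySem.Str.isIn (rotS t) pat ||
         PySem.Str.isIn (rotS (rotS t)) pat || PySem.Str.isIn (rotS (rotS (rotS t))) pat
      then some (key ++ " perm") else goA rest t := by
  have h1 := PreS_rotS h
  have h2 := PreS_rotS h1
  have h3 := PreS_rotS h2
  by_cases b0 : PySem.Chars.isIn t.toList pat.toList = true <;>
    by_cases b1 : PySem.Chars.isIn (rotS t).toList pat.toList = true <;>
      by_cases b2 : PySem.Chars.isIn (rotS (rotS t)).toList pat.toList = true <;>
        by_cases b3 : PySem.Chars.isIn (rotS (rotS (rotS t))).toList pat.toList = true <;>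
          simp [goA, tryKeyA,
            rotateA_eq h, rotateA_eq h1, rotateA_eq h2, rotateA_eq h3, rotS_four h,
            b0, b1, b2, b3]

-- ----- B-side signature computation -----
theorem diffGoB_cons {a b : Char} (ha : gobr a) (hb : gobr b)
    (rest : List (Char × Char)) (acc : List Char) :
    diffGoB ((a, b) :: rest) acc = diffGoB rest (acc ++ [pairChar a b]) := by
  rcases ha with rfl | rfl | rfl | rfl <;> rcases hb with rfl | rfl | rfl | rfl <;> rfl

theorem diffGoB_eq : ∀ (l : List Char), (∀ c ∈ l, gobr c) →
    ∀ acc, diffGoB (l.zip (l.drop 1)) acc = some (acc ++ diffP l) := by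
  intro l
  induction l with
  | nil => intro _ acc; simp [diffGoB, diffP]
  | cons a t ih =>
    cases t with
    | nil => intro _ acc; simp [diffGoB, diffP]
    | cons b t' =>
      intro h acc
      rw [show ((a :: b :: t').zip ((a :: b :: t').drop 1)) =
            (a, b) :: ((b :: t').zip ((b :: t').drop 1)) from rfl]
      rw [diffGoB_cons (h a (by simp)) (h b (by simp))]
      rw [ih (fun c hc => h c (List.mem_cons_of_mem a hc)) (acc ++ [pairChar a b])]
      simp [diffP]

theorem diffB_eq {s : String} (h : PreS s) :
    diffB s = some (String.ofList (diffP s.toList)) := by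
  simp only [diffB, diffGoB_eq s.toList h, List.nil_append, Option.map_some]

-- the pattern table: every pattern is non-empty and uses only the four colours
theorem toList_ofList (l : List Char) : (String.ofList l).toList = l := by simp

def gobrB (c : Char) : Bool := c == 'g' || c == 'o' || c == 'b' || c == 'r'

theorem all_gobr {l : List Char} (h : l.all gobrB = true) : ∀ c ∈ l, gobr c := by
  intro c hc
  have hg := List.all_eq_true.mp h c hc
  simp only [gobrB, Bool.or_eq_true, beq_iff_eq] at hg
  tauto

theorem table_ok : ∀ kp ∈ pllTable, kp.2.toList ≠ [] ∧ kp.2.toList.all gobrB = true := by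
  decide

-- ----- combining: the two table scans agree -----
theorem go_eq : ∀ (l : List (String × String)),
    (∀ kp ∈ l, kp.2.toList ≠ [] ∧ kp.2.toList.all gobrB = true) → ∀ t : String, PreS t →
    goA l t = some (goB (l.map (fun kp => (kp.1, (diffB kp.2).getD "")))
      (String.ofList (diffP t.toList))) := by
  intro l hl
  induction l with
  | nil => intro t ht; rfl
  | cons kp rest ih =>
    obtain ⟨key, pat⟩ := kp
    intro t ht
    obtain ⟨hne, hgpB⟩ := hl (key, pat) (by simp)
    have hgp : ∀ c ∈ pat.toList, gobr c := all_gobr hgpB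
    have hBpat : (diffB pat).getD "" = String.ofList (diffP pat.toList) := by
      rw [diffB_eq hgp]; rfl
    have hcond : (PySem.Str.isIn t pat || PySem.Str.isIn (rotS t) pat ||
        PySem.Str.isIn (rotS (rotS t)) pat || PySem.Str.isIn (rotS (rotS (rotS t))) pat) =
        PySem.Str.isIn (String.ofList (diffP t.toList)) (String.ofList (diffP pat.toList)) := by
      have hiff := main_iff t.toList pat.toList ht hgp hne
      rw [Bool.eq_iff_iff]
      simp only [Bool.or_eq_true, PySem.Str.isIn_iff_infix, toList_rotS, toList_ofList]
      rw [or_assoc, or_assoc]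
      exact hiff
    rw [goA_cons key pat rest ht, hcond]
    by_cases hc : PySem.Chars.isIn (diffP t.toList) (diffP pat.toList) = true
    · simp [goB, List.map_cons, hBpat, hc]
    · simp [goB, List.map_cons, hBpat, hc,
        ih (fun k hk => hl k (List.mem_cons_of_mem _ hk)) t ht]

-- ===== VERDICT (by name: the statement is the Claim_ definition above) =====
theorem check_pll_spec : Claim_equal_check_pll := by
  intro text _ hpre
  have h : PreS text := by
    intro c hc
    have hg := List.all_eq_true.mp hpre c hc
    simp only [Bool.or_eq_true, beq_iff_eq] at hg
    tauto
  unfold Spec_check_pll check_pll check_pll_alt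
  rw [go_eq pllTable table_ok text h, diffB_eq h]
  rfl
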